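-- pv_equiv track=rewrite | github.com/ZhangCheng-zh/blog | Robinhood/employeeReferSystem.py | referSystem
-- ===== SOURCE A (Python) =====
-- from collections import defaultdict, deque
--
-- def referSystem(referrers, referrals):
--     g = defaultdict(list) # each node can have one or many children
--     rg = defaultdict(int) # each node have only one parent
--     nodes = set() # record all nodes show, all these nodes can not be referred any more
--
--     # time O(n) space O(V + E)
--     for u, v in zip(referrers, referrals):
--         nodes.add(u)
--         if v in nodes: # if already in platform, cannot be referred no more
--             continue
--         rg[v] = u
--         g[u].append(v)
--         nodes.add(v)
--
--     outDegree =  { x: len(g[x]) for x in nodes }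
--     cnt = defaultdict(int)
--
--
--     q = deque()
--     # put all outdegree of 0 points into q
--     for x in nodes:
--         if outDegree[x] == 0:
--             q.append(x)
--
--     # time O(V + E) space: O(V)
--     while q:
--         x = q.popleft()
--         if x in rg: # x has parent
--             p = rg[x]
--             cnt[p] += 1 + cnt[x] # add children's cnt to parent's cnt
--             outDegree[p] -= 1 # decrease parent's outdegree
--             if outDegree[p] == 0: # if p already be added all children's cnt, add p into queue
--                 q.append(p)
--
--     items = [(u, c) for u, c in cnt.items() if c > 0]
--     # time: O(VlogV)
--     items.sort(key = lambda t: (-t[1], t[0])) # sort by count decrease, then sort by name increase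
--
--     return items[:3]  # time O(n + VlogV) space O(V + E)
-- ===== SOURCE B (Python) =====
-- def referSystem(referrers, referrals):
--     # One reverse pass over the kept referral edges replaces the Kahn queue sweep:
--     # edges always point to fresh nodes, so the edge list is already topologically
--     # ordered and a single right-to-left accumulation yields each referrer's
--     # total descendant count.
--     seen = set()
--     edges = []
--     for u, v in zip(referrers, referrals):
--         seen.add(u)
--         if v not in seen:
--             edges.append((u, v))
--             seen.add(v)
--     cnt = {}
--     for u, v in reversed(edges):
--         cnt[u] = cnt.get(u, 0) + 1 + cnt.get(v, 0)
--     items = sorted(cnt.items(), key=lambda t: (-t[1], t[0]))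
--     return items[:3]
-- ===== Notes on version B (the rewrite author's own statement) =====
-- stated objective: faster
-- what changed: Descendant counts are computed by one right-to-left accumulation over the kept referral-edge list (topologically ordered because every kept edge targets a fresh node), replacing A's out-degree map, zero-out-degree deque and Kahn sweep; the constant-factor win comes from dropping that per-node queue/out-degree bookkeeping.
import Mathlib
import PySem

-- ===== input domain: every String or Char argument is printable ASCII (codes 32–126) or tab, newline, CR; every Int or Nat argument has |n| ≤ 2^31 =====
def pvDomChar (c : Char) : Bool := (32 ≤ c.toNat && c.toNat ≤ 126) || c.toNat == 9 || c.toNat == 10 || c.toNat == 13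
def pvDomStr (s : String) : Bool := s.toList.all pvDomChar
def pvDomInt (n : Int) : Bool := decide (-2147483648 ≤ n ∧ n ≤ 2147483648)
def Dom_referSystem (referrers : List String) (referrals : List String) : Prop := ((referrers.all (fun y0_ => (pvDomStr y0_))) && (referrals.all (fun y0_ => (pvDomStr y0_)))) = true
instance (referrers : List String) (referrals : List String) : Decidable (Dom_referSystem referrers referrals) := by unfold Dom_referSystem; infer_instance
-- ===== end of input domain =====

-- B replaces A's Kahn out-degree/deque sweep by a single reverse pass over the kept
-- referral-edge list (every kept edge points to a fresh node, so the edge list is already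
-- topologically ordered); graph filtering, the (-count, name) sort and the top-3 slice agree.

-- ===== PORT A =====
-- A's Kahn while-loop: q is the deque (popleft = head, append = snoc); fuel bounds the
-- iteration count (proved sufficient below, so it never truncates on any input).
def referKahn (rg : PySem.Dict String String) :
    Nat → List String → PySem.Dict String Int → PySem.Dict String Int → PySem.Dict String Int
  | _, [], _, cnt => cnt
  | 0, _ :: _, _, cnt => cnt
  | fuel+1, x :: q, od, cnt =>
    if rg.contains x then
      let p := rg.getD x ""
      let cnt' := cnt.insert p (cnt.getD p 0 + 1 + cnt.getD x 0)
      let od' := od.insert p (od.getD p 0 - 1)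
      if od'.getD p 0 == 0 then referKahn rg fuel (q ++ [p]) od' cnt'
      else referKahn rg fuel q od' cnt'
    else referKahn rg fuel q od cnt

-- Port of A.  defaultdict reads that only materialize zero-valued entries (removed by the
-- `c > 0` filter before the deterministic total-key sort) are modeled with getD.
def referSystem (referrers : List String) (referrals : List String) : List (String × Int) :=
  let st := (referrers.zip referrals).foldl
    (fun (s : PySem.Dict String (List String) × PySem.Dict String String × PySem.Set String) uv =>
      let nodes := PySem.Set.add s.2.2 uv.1
      if PySem.Set.contains nodes uv.2 then (s.1, s.2.1, nodes)
      else (s.1.modify uv.1 [] (fun l => l ++ [uv.2]), s.2.1.insert uv.2 uv.1, PySem.Set.add nodes uv.2))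
    (PySem.Dict.empty, PySem.Dict.empty, PySem.Set.empty)
  let g := st.1
  let rg := st.2.1
  let nodes := st.2.2
  let outDegree := nodes.foldl (fun d x => d.insert x ((g.getD x []).length : Int)) PySem.Dict.empty
  let q := nodes.foldl (fun q x => if outDegree.getD x 0 == 0 then q ++ [x] else q) []
  let cnt := referKahn rg nodes.length q outDegree PySem.Dict.empty
  let items := cnt.items.filter (fun t => decide (0 < t.2))
  PySem.List.slice (PySem.List.sorted2 items (fun t => -t.2) (fun t => t.1)) none (some 3)

-- ===== PORT B =====
-- Port of B: keep the kept-edge list, then one reverse pass accumulates descendant counts.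
def referSystem_alt (referrers : List String) (referrals : List String) : List (String × Int) :=
  let st := (referrers.zip referrals).foldl
    (fun (s : PySem.Set String × List (String × String)) uv =>
      let seen := PySem.Set.add s.1 uv.1
      if PySem.Set.contains seen uv.2 then (seen, s.2)
      else (PySem.Set.add seen uv.2, s.2 ++ [uv]))
    (PySem.Set.empty, [])
  let cnt := st.2.reverse.foldl
    (fun (d : PySem.Dict String Int) uv => d.insert uv.1 (d.getD uv.1 0 + 1 + d.getD uv.2 0))
    PySem.Dict.empty
  PySem.List.slice (PySem.List.sorted2 cnt.items (fun t => -t.2) (fun t => t.1)) none (some 3)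

-- ===== PRECONDITION & SPEC =====
def Spec_referSystem (referrers : List String) (referrals : List String) (out : List (String × Int)) : Prop := out = referSystem_alt referrers referrals
instance (referrers : List String) (referrals : List String) (out : List (String × Int)) : Decidable (Spec_referSystem referrers referrals out) := by unfold Spec_referSystem; infer_instance

-- ===== CLAIM (what is proved, stated in full; the proofs are below) =====
def Claim_equal_referSystem : Prop := ∀ (referrers : List String) (referrals : List String), Dom_referSystem referrers referrals → Spec_referSystem referrers referrals (referSystem referrers referrals)

-- ===== LEMMAS AND PROOFS =====

-- The kept referral edges and the node set, as one recursion over the zipped input.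
def keptP : List (String × String) → PySem.Set String → PySem.Set String × List (String × String)
  | [], s => (s, [])
  | uv :: t, s =>
    let s' := PySem.Set.add s uv.1
    if PySem.Set.contains s' uv.2 then keptP t s'
    else
      let r := keptP t (PySem.Set.add s' uv.2)
      (r.1, uv :: r.2)

-- children of x in the kept-edge list
def chl (E : List (String × String)) (x : String) : List String :=
  (E.filter (fun e => e.1 == x)).map (fun e => e.2)

-- B's reverse accumulation, as a head recursion (foldr form)
def goDesc : List (String × String) → PySem.Dict String Int
  | [] => PySem.Dict.empty
  | e :: t =>
    let d := goDesc t
    d.insert e.1 (d.getD e.1 0 + 1 + d.getD e.2 0)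

-- well-formedness of the kept edges: each target is globally fresh at its edge
def WF : List (String × String) → List String → Prop
  | [], _ => True
  | e :: t, s => e.2 ∉ s ∧ e.2 ≠ e.1 ∧ WF t (e.2 :: e.1 :: s)

-- partial sum of (1 + desc) over the processed children of y
def sInv (E : List (String × String)) (P : List String) (y : String) : Int :=
  (((chl E y).filter (fun c => decide (c ∈ P))).map (fun c => 1 + (goDesc E).getD c 0)).sum

-- ---------- build-phase bridges ----------

def bstep (st : PySem.Set String × List (String × String)) (uv : String × String) :
    PySem.Set String × List (String × String) :=
  let seen := PySem.Set.add st.1 uv.1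
  if PySem.Set.contains seen uv.2 then (seen, st.2)
  else (PySem.Set.add seen uv.2, st.2 ++ [uv])

def astep (st : PySem.Dict String (List String) × PySem.Dict String String × PySem.Set String)
    (uv : String × String) :
    PySem.Dict String (List String) × PySem.Dict String String × PySem.Set String :=
  let nodes := PySem.Set.add st.2.2 uv.1
  if PySem.Set.contains nodes uv.2 then (st.1, st.2.1, nodes)
  else (st.1.modify uv.1 [] (fun l => l ++ [uv.2]), st.2.1.insert uv.2 uv.1,
        PySem.Set.add nodes uv.2)

theorem bfold_eq (zs : List (String × String)) :
    ∀ (s : PySem.Set String) (acc : List (String × String)),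
    zs.foldl bstep (s, acc) = ((keptP zs s).1, acc ++ (keptP zs s).2) := by
  induction zs with
  | nil => intro s acc; simp [keptP]
  | cons uv t ih =>
    intro s acc
    simp only [List.foldl_cons, keptP]
    by_cases h : PySem.Set.contains (PySem.Set.add s uv.1) uv.2 = true
    · have hb : bstep (s, acc) uv = (PySem.Set.add s uv.1, acc) := by unfold bstep; rw [if_pos h]
      rw [hb, ih, if_pos h]
    · have hb : bstep (s, acc) uv
          = (PySem.Set.add (PySem.Set.add s uv.1) uv.2, acc ++ [uv]) := by unfold bstep; rw [if_neg h]
      rw [hb, ih, if_neg h]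
      simp

theorem afold_eq (zs : List (String × String)) :
    ∀ (g : PySem.Dict String (List String)) (rg : PySem.Dict String String) (s : PySem.Set String),
    zs.foldl astep (g, rg, s)
    = ((keptP zs s).2.foldl (fun d e => d.modify e.1 [] (fun l => l ++ [e.2])) g,
       (keptP zs s).2.foldl (fun d e => d.insert e.2 e.1) rg,
       (keptP zs s).1) := by
  induction zs with
  | nil => intro g rg s; simp [keptP]
  | cons uv t ih =>
    intro g rg s
    simp only [List.foldl_cons, keptP]
    by_cases h : PySem.Set.contains (PySem.Set.add s uv.1) uv.2 = true
    · have ha : astep (g, rg, s) uv = (g, rg, PySem.Set.add s uv.1) := by unfold astep; rw [if_pos h]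
      rw [ha, ih, if_pos h]
    · have ha : astep (g, rg, s) uv
          = (g.modify uv.1 [] (fun l => l ++ [uv.2]), rg.insert uv.2 uv.1,
             PySem.Set.add (PySem.Set.add s uv.1) uv.2) := by unfold astep; rw [if_neg h]
      rw [ha, ih, if_neg h]
      simp

-- ---------- WF and keptP structure ----------

theorem wf_mono : ∀ (E : List (String × String)) (s s' : List String),
    (∀ x ∈ s, x ∈ s') → WF E s' → WF E s := by
  intro E
  induction E with
  | nil => intro s s' _ _; trivial
  | cons e t ih =>
    intro s s' hsub hw
    obtain ⟨h1, h2, h3⟩ := hw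
    refine ⟨fun hc => h1 (hsub _ hc), h2, ih _ _ ?_ h3⟩
    intro x hx
    simp only [List.mem_cons] at hx ⊢
    tauto

theorem wf_keptP : ∀ (zs : List (String × String)) (s : PySem.Set String),
    WF (keptP zs s).2 s := by
  intro zs
  induction zs with
  | nil => intro s; trivial
  | cons uv t ih =>
    intro s
    simp only [keptP]
    by_cases h : PySem.Set.contains (PySem.Set.add s uv.1) uv.2 = true
    · rw [if_pos h]
      refine wf_mono _ _ _ (fun x hx => ?_) (ih (PySem.Set.add s uv.1))
      simp [PySem.Set.mem_add, hx]
    · rw [if_neg h]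
      have hv : uv.2 ∉ PySem.Set.add s uv.1 := by
        intro hc
        exact h ((PySem.Set.contains_iff _ _).mpr hc)
      rw [PySem.Set.mem_add] at hv
      push_neg at hv
      refine ⟨hv.1, hv.2, ?_⟩
      refine wf_mono _ _ _ (fun x hx => ?_) (ih (PySem.Set.add (PySem.Set.add s uv.1) uv.2))
      simp only [List.mem_cons] at hx
      simp only [PySem.Set.mem_add]
      tauto

theorem wf_targets_not_mem : ∀ (E : List (String × String)) (s : List String),
    WF E s → ∀ e ∈ E, e.2 ∉ s := by
  intro E
  induction E with
  | nil => intro s _ e he; cases he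
  | cons f t ih =>
    intro s hw e he
    obtain ⟨h1, h2, h3⟩ := hw
    rcases List.mem_cons.mp he with h | h
    · subst h; exact h1
    · intro hc
      exact ih _ h3 e h (by simp [hc])

theorem wf_ne : ∀ (E : List (String × String)) (s : List String),
    WF E s → ∀ e ∈ E, e.2 ≠ e.1 := by
  intro E
  induction E with
  | nil => intro s _ e he; cases he
  | cons f t ih =>
    intro s hw e he
    obtain ⟨h1, h2, h3⟩ := hw
    rcases List.mem_cons.mp he with h | h
    · subst h; exact h2
    · exact ih _ h3 e h

theorem wf_targets_nodup : ∀ (E : List (String × String)) (s : List String),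
    WF E s → (E.map (fun e => e.2)).Nodup := by
  intro E
  induction E with
  | nil => intro s _; simp
  | cons f t ih =>
    intro s hw
    obtain ⟨h1, h2, h3⟩ := hw
    simp only [List.map_cons, List.nodup_cons]
    constructor
    · intro hc
      rcases List.mem_map.mp hc with ⟨e, he, hee⟩
      exact wf_targets_not_mem t _ h3 e he (by simp [hee])
    · exact ih _ h3

theorem add_prefix : ∀ (s : PySem.Set String) (x : String),
    ∃ Δ, PySem.Set.add s x = s ++ Δ := by
  intro s x
  rw [PySem.Set.add_eq_ite]
  by_cases hm : x ∈ s
  · rw [if_pos hm]; exact ⟨[], by simp⟩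
  · rw [if_neg hm]; exact ⟨[x], rfl⟩

theorem keptP_prefix : ∀ (zs : List (String × String)) (s : PySem.Set String),
    ∃ Δ, (keptP zs s).1 = s ++ Δ := by
  intro zs
  induction zs with
  | nil => intro s; exact ⟨[], by simp [keptP]⟩
  | cons uv t ih =>
    intro s
    simp only [keptP]
    by_cases h : PySem.Set.contains (PySem.Set.add s uv.1) uv.2 = true
    · rw [if_pos h]
      obtain ⟨Δ, hΔ⟩ := ih (PySem.Set.add s uv.1)
      obtain ⟨Δ0, h0⟩ := add_prefix s uv.1
      exact ⟨Δ0 ++ Δ, by rw [hΔ, h0, List.append_assoc]⟩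
    · rw [if_neg h]
      obtain ⟨Δ, hΔ⟩ := ih (PySem.Set.add (PySem.Set.add s uv.1) uv.2)
      obtain ⟨Δ0, h0⟩ := add_prefix s uv.1
      obtain ⟨Δ1, h1⟩ := add_prefix (PySem.Set.add s uv.1) uv.2
      exact ⟨Δ0 ++ Δ1 ++ Δ, by rw [hΔ, h1, h0]; simp⟩

theorem keptP_mono_mem : ∀ (zs : List (String × String)) (s : PySem.Set String) (x : String),
    x ∈ s → x ∈ (keptP zs s).1 := by
  intro zs s x hx
  obtain ⟨Δ, hΔ⟩ := keptP_prefix zs s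
  rw [hΔ]
  exact List.mem_append_left _ hx

theorem keptP_nodup : ∀ (zs : List (String × String)) (s : PySem.Set String),
    s.Nodup → (keptP zs s).1.Nodup := by
  intro zs
  induction zs with
  | nil => intro s h; simpa [keptP] using h
  | cons uv t ih =>
    intro s h
    simp only [keptP]
    by_cases hc : PySem.Set.contains (PySem.Set.add s uv.1) uv.2 = true
    · rw [if_pos hc]
      exact ih _ (PySem.Set.nodup_add _ _ h)
    · rw [if_neg hc]
      exact ih _ (PySem.Set.nodup_add _ _ (PySem.Set.nodup_add _ _ h))

theorem keptP_edge_split : ∀ (zs : List (String × String)) (s : PySem.Set String),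
    ∀ e ∈ (keptP zs s).2, ∃ p r, (keptP zs s).1 = p ++ r ∧ e.1 ∈ p ∧ e.2 ∉ p ∧
      e.2 ∈ (keptP zs s).1 := by
  intro zs
  induction zs with
  | nil => intro s e he; simp [keptP] at he
  | cons uv t ih =>
    intro s e he
    simp only [keptP] at he ⊢
    by_cases h : PySem.Set.contains (PySem.Set.add s uv.1) uv.2 = true
    · rw [if_pos h] at he ⊢
      exact ih _ e he
    · rw [if_neg h] at he ⊢
      have hv : uv.2 ∉ PySem.Set.add s uv.1 := by
        intro hcm
        exact h ((PySem.Set.contains_iff _ _).mpr hcm)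
      rcases List.mem_cons.mp he with hh | hh
      · subst hh
        obtain ⟨Δ, hΔ⟩ := keptP_prefix t (PySem.Set.add (PySem.Set.add s e.1) e.2)
        have hadd : PySem.Set.add (PySem.Set.add s e.1) e.2
            = PySem.Set.add s e.1 ++ [e.2] := PySem.Set.add_of_not_mem hv
        refine ⟨PySem.Set.add s e.1, [e.2] ++ Δ, ?_, ?_, hv, ?_⟩
        · rw [hΔ, hadd]; simp
        · simp [PySem.Set.mem_add]
        · exact keptP_mono_mem _ _ _ (by simp [PySem.Set.mem_add])
      · exact ih _ e hh

-- ---------- children and goDesc ----------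

theorem chl_mem (E : List (String × String)) (x c : String) :
    c ∈ chl E x ↔ (x, c) ∈ E := by
  unfold chl
  constructor
  · intro h
    rcases List.mem_map.mp h with ⟨e, he, hee⟩
    rcases List.mem_filter.mp he with ⟨he1, he2⟩
    have : e = (x, c) := by
      cases e
      simp only [beq_iff_eq] at he2
      simp_all
    rwa [this] at he1
  · intro h
    exact List.mem_map.mpr ⟨(x, c), List.mem_filter.mpr ⟨h, by simp⟩, rfl⟩

theorem chl_cons (e : String × String) (t : List (String × String)) (x : String) :
    chl (e :: t) x = if e.1 = x then e.2 :: chl t x else chl t x := by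
  unfold chl
  by_cases h : e.1 = x
  · simp [List.filter_cons, h]
  · simp [List.filter_cons, h]

theorem chl_sublist_targets (E : List (String × String)) (x : String) :
    (chl E x).Sublist (E.map (fun e => e.2)) := by
  unfold chl
  exact List.Sublist.map _ List.filter_sublist

theorem goDesc_nonneg : ∀ (E : List (String × String)) (x : String),
    0 ≤ (goDesc E).getD x 0 := by
  intro E
  induction E with
  | nil => intro x; simp [goDesc, PySem.Dict.getD_empty]
  | cons e t ih =>
    intro x
    simp only [goDesc]
    rw [PySem.Dict.getD_insert]
    by_cases h : x = e.1
    · rw [if_pos h]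
      have := ih e.1
      have := ih e.2
      omega
    · rw [if_neg h]; exact ih x

theorem goDesc_keys_mem : ∀ (E : List (String × String)) (k : String),
    k ∈ (goDesc E).keys ↔ k ∈ E.map (fun e => e.1) := by
  intro E
  induction E with
  | nil => intro k; simp [goDesc, PySem.Dict.keys_empty]
  | cons e t ih =>
    intro k
    simp only [goDesc, List.map_cons, List.mem_cons]
    rw [PySem.Dict.mem_keys_insert, ih]

theorem goDesc_keys_nodup : ∀ (E : List (String × String)),
    (goDesc E).keys.Nodup := by
  intro E
  induction E with
  | nil => simp [goDesc, PySem.Dict.keys_empty]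
  | cons e t ih => exact PySem.Dict.nodup_keys_insert _ _ _ ih

theorem goDesc_pos : ∀ (E : List (String × String)) (k : String),
    k ∈ (goDesc E).keys → 1 ≤ (goDesc E).getD k 0 := by
  intro E
  induction E with
  | nil => intro k hk; simp [goDesc, PySem.Dict.keys_empty] at hk
  | cons e t ih =>
    intro k hk
    simp only [goDesc]
    rw [PySem.Dict.getD_insert]
    by_cases h : k = e.1
    · rw [if_pos h]
      have h1 := goDesc_nonneg t e.1
      have h2 := goDesc_nonneg t e.2
      omega
    · rw [if_neg h]
      simp only [goDesc] at hk
      rcases (PySem.Dict.mem_keys_insert _ _ _ _).mp hk with hc | hc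
      · exact absurd hc h
      · exact ih k hc

theorem goDesc_sum : ∀ (E : List (String × String)) (s : List String), WF E s →
    ∀ x, (goDesc E).getD x 0 = ((chl E x).map (fun c => 1 + (goDesc E).getD c 0)).sum := by
  intro E
  induction E with
  | nil => intro s _ x; simp [goDesc, chl, PySem.Dict.getD_empty]
  | cons e t ih =>
    intro s hw x
    obtain ⟨h1, h2, h3⟩ := hw
    have htgt : ∀ f ∈ t, f.2 ≠ e.1 ∧ f.2 ≠ e.2 := by
      intro f hf
      have := wf_targets_not_mem t _ h3 f hf
      simp only [List.mem_cons] at this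
      push_neg at this
      exact ⟨this.2.1, this.1⟩
    have hchl_ne : ∀ c ∈ chl t x, c ≠ e.1 := by
      intro c hc
      exact (htgt _ ((chl_mem t x c).mp hc)).1
    have hmap_eq : ∀ (x' : String),
        ((chl t x').map (fun c => 1 + (goDesc (e :: t)).getD c 0)).sum
        = ((chl t x').map (fun c => 1 + (goDesc t).getD c 0)).sum := by
      intro x'
      congr 1
      apply List.map_congr_left
      intro c hc
      have hne : c ≠ e.1 := (htgt _ ((chl_mem t x' c).mp hc)).1
      simp only [goDesc]
      rw [PySem.Dict.getD_insert, if_neg hne]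
    rw [chl_cons]
    by_cases hx : e.1 = x
    · rw [if_pos hx]
      subst hx
      simp only [List.map_cons, List.sum_cons]
      rw [hmap_eq]
      simp only [goDesc]
      rw [PySem.Dict.getD_insert, if_pos rfl, PySem.Dict.getD_insert, if_neg h2]
      rw [ih _ h3 e.1]
      omega
    · rw [if_neg hx]
      rw [hmap_eq]
      simp only [goDesc]
      rw [PySem.Dict.getD_insert, if_neg (fun hc => hx hc.symm)]
      exact ih _ h3 x

-- ---------- finite-set filter bookkeeping ----------

theorem filter_mem_congr (l P P' : List String) (h : ∀ c ∈ l, c ∈ P ↔ c ∈ P') :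
    l.filter (fun c => decide (c ∈ P)) = l.filter (fun c => decide (c ∈ P')) := by
  apply List.filter_congr
  intro c hc
  simp [h c hc]

theorem filter_cons_not_mem (l P : List String) (x : String) (h : x ∉ l) :
    l.filter (fun c => decide (c ∈ x :: P)) = l.filter (fun c => decide (c ∈ P)) := by
  apply List.filter_congr
  intro c hc
  have : c ≠ x := fun he => h (he ▸ hc)
  simp [this]

theorem filter_not_cons_not_mem (l P : List String) (x : String) (h : x ∉ l) :
    l.filter (fun c => !decide (c ∈ x :: P)) = l.filter (fun c => !decide (c ∈ P)) := by
  apply List.filter_congr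
  intro c hc
  have : c ≠ x := fun he => h (he ▸ hc)
  simp [this]

theorem filter_cons_sum (f : String → Int) :
    ∀ (l : List String) (P : List String) (x : String), x ∈ l → l.Nodup → x ∉ P →
    ((l.filter (fun c => decide (c ∈ x :: P))).map f).sum
      = ((l.filter (fun c => decide (c ∈ P))).map f).sum + f x := by
  intro l
  induction l with
  | nil => intro P x hx; cases hx
  | cons a t ih =>
    intro P x hx hnd hxP
    rcases List.nodup_cons.mp hnd with ⟨ha, hnd'⟩
    simp only [List.filter_cons]
    rcases List.mem_cons.mp hx with h | h
    · subst h
      have h1 : decide (x ∈ x :: P) = true := by simp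
      have h2 : decide (x ∈ P) = false := by simpa using hxP
      rw [h1, h2, filter_cons_not_mem t P x ha]
      simp
      omega
    · have hax : a ≠ x := fun he => ha (he ▸ h)
      have hiff : decide (a ∈ x :: P) = decide (a ∈ P) := by simp [hax]
      rw [hiff]
      by_cases hm : decide (a ∈ P) = true
      · rw [hm]
        simp only [if_true, List.map_cons, List.sum_cons]
        rw [ih P x h hnd' hxP]
        omega
      · simp only [Bool.not_eq_true] at hm
        rw [hm]
        simpa using ih P x h hnd' hxP

theorem filter_not_cons_len :
    ∀ (l : List String) (P : List String) (x : String), x ∈ l → l.Nodup → x ∉ P →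
    ((l.filter (fun c => !decide (c ∈ x :: P))).length : Int)
      = ((l.filter (fun c => !decide (c ∈ P))).length : Int) - 1 := by
  intro l
  induction l with
  | nil => intro P x hx; cases hx
  | cons a t ih =>
    intro P x hx hnd hxP
    rcases List.nodup_cons.mp hnd with ⟨ha, hnd'⟩
    simp only [List.filter_cons]
    rcases List.mem_cons.mp hx with h | h
    · subst h
      have h1 : (!decide (x ∈ x :: P)) = false := by simp
      have h2 : (!decide (x ∈ P)) = true := by simpa using hxP
      rw [h1, h2, filter_not_cons_not_mem t P x ha]
      simp
    · have hax : a ≠ x := fun he => ha (he ▸ h)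
      have hiff : (!decide (a ∈ x :: P)) = (!decide (a ∈ P)) := by simp [hax]
      rw [hiff]
      by_cases hm : (!decide (a ∈ P)) = true
      · rw [hm]
        simp only [if_true, List.length_cons]
        have := ih P x h hnd' hxP
        push_cast
        push_cast at this
        omega
      · simp only [Bool.not_eq_true] at hm
        rw [hm]
        simpa using ih P x h hnd' hxP

-- ---------- all nodes get processed when no node is ready ----------

theorem processed_all (E : List (String × String)) (N P : List String)
    (hmemN : ∀ e ∈ E, e.1 ∈ N ∧ e.2 ∈ N)
    (hsplit : ∀ e ∈ E, ∃ p r, N = p ++ r ∧ e.1 ∈ p ∧ e.2 ∉ p)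
    (hnoready : ∀ y, ¬ (y ∈ N ∧ y ∉ P ∧ ∀ c ∈ chl E y, c ∈ P)) :
    ∀ y ∈ N, y ∈ P := by
  by_contra hc
  push_neg at hc
  obtain ⟨y0, hy0N, hy0P⟩ := hc
  set l := N.filter (fun c => !decide (c ∈ P)) with hl
  have hy0l : y0 ∈ l := by
    rw [hl]
    exact List.mem_filter.mpr ⟨hy0N, by simpa using hy0P⟩
  have hlne : l ≠ [] := fun h => by rw [h] at hy0l; cases hy0l
  obtain ⟨x, hx⟩ : ∃ x, x ∈ l.argmax (fun y => N.idxOf y) := by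
    cases harg : l.argmax (fun y => N.idxOf y) with
    | none => exact absurd (List.argmax_eq_none.mp harg) hlne
    | some m => exact ⟨m, rfl⟩
  have hxl : x ∈ l := List.argmax_mem hx
  have hxN : x ∈ N := (List.mem_filter.mp hxl).1
  have hxP : x ∉ P := by
    have := (List.mem_filter.mp hxl).2
    simpa using this
  have := hnoready x
  push_neg at this
  obtain ⟨c, hc_chl, hcP⟩ := this hxN hxP
  have hedge : (x, c) ∈ E := (chl_mem E x c).mp hc_chl
  have hcN : c ∈ N := (hmemN _ hedge).2
  have hcl : c ∈ l := List.mem_filter.mpr ⟨hcN, by simpa using hcP⟩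
  have hle : N.idxOf c ≤ N.idxOf x := List.le_of_mem_argmax hcl hx
  obtain ⟨p, r, hN, hxp, hcp⟩ := hsplit _ hedge
  have h1 : N.idxOf x < p.length := by
    rw [hN, List.idxOf_append_of_mem hxp]
    exact List.idxOf_lt_length_of_mem hxp
  have h2 : p.length ≤ N.idxOf c := by
    rw [hN, List.idxOf_append_of_notMem hcp]
    omega
  omega

-- ---------- the terminal state of the sweep ----------

theorem kahn_final (E : List (String × String)) (N P : List String)
    (cnt : PySem.Dict String Int)
    (hmemN : ∀ e ∈ E, e.1 ∈ N ∧ e.2 ∈ N)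
    (hsplit : ∀ e ∈ E, ∃ p r, N = p ++ r ∧ e.1 ∈ p ∧ e.2 ∉ p)
    (hPN : ∀ y ∈ P, y ∈ N)
    (hnoready : ∀ y, ¬ (y ∈ N ∧ y ∉ P ∧ ∀ c ∈ chl E y, c ∈ P))
    (hcnt : ∀ y, cnt.getD y 0 = sInv E P y)
    (hkeys : ∀ k, k ∈ cnt.keys ↔ ∃ w ∈ P, (k, w) ∈ E) :
    (∀ y, cnt.getD y 0 = sInv E N y) ∧
    (∀ k, k ∈ cnt.keys ↔ ∃ w ∈ N, (k, w) ∈ E) := by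
  have hNP : ∀ y ∈ N, y ∈ P := processed_all E N P hmemN hsplit hnoready
  constructor
  · intro y
    rw [hcnt y]
    unfold sInv
    rw [filter_mem_congr _ P N (fun c _ => ⟨fun h => hPN c h, fun h => hNP c h⟩)]
  · intro k
    rw [hkeys k]
    constructor
    · rintro ⟨w, hwP, hwE⟩
      exact ⟨w, hPN w hwP, hwE⟩
    · rintro ⟨w, hwN, hwE⟩
      exact ⟨w, hNP w hwN, hwE⟩

-- ---------- the Kahn sweep invariant ----------

theorem kahn_main
    (E : List (String × String)) (N : List String) (rg : PySem.Dict String String)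
    (hwf : WF E [])
    (hmemN : ∀ e ∈ E, e.1 ∈ N ∧ e.2 ∈ N)
    (hsplit : ∀ e ∈ E, ∃ p r, N = p ++ r ∧ e.1 ∈ p ∧ e.2 ∉ p)
    (hrgc : ∀ x, rg.contains x = true ↔ x ∈ E.map (fun e => e.2))
    (hrgg : ∀ u x, (u, x) ∈ E → rg.getD x "" = u) :
    ∀ (fuel : Nat) (q P : List String) (od cnt : PySem.Dict String Int),
    P.Nodup → q.Nodup →
    (∀ y ∈ P, y ∈ N) →
    (∀ y ∈ P, ∀ c ∈ chl E y, c ∈ P) →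
    (∀ y, y ∈ q ↔ (y ∈ N ∧ y ∉ P ∧ ∀ c ∈ chl E y, c ∈ P)) →
    (∀ y ∈ N, od.getD y 0 = (((chl E y).filter (fun c => !decide (c ∈ P))).length : Int)) →
    (∀ y, cnt.getD y 0 = sInv E P y) →
    (∀ k, k ∈ cnt.keys ↔ ∃ w ∈ P, (k, w) ∈ E) →
    cnt.keys.Nodup →
    (N.length ≤ P.length + fuel) →
    (∀ y, (referKahn rg fuel q od cnt).getD y 0 = sInv E N y) ∧
    (∀ k, k ∈ (referKahn rg fuel q od cnt).keys ↔ ∃ w ∈ N, (k, w) ∈ E) ∧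
    (referKahn rg fuel q od cnt).keys.Nodup := by
  intro fuel
  induction fuel with
  | zero =>
    intro q P od cnt hPnd hqnd hPN hclosed hready hod hcnt hkeys hknd hfuel
    cases q with
    | nil =>
      have hfin := kahn_final E N P cnt hmemN hsplit hPN
        (fun y hy => by have := (hready y).mpr hy; cases this) hcnt hkeys
      exact ⟨hfin.1, hfin.2, hknd⟩
    | cons x q' =>
      exfalso
      obtain ⟨hxN, hxP, _⟩ := (hready x).mp (List.mem_cons_self)
      have hsub : (x :: P).Subperm N :=
        List.subperm_of_subset (List.nodup_cons.mpr ⟨hxP, hPnd⟩)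
          (fun y hy => by
            rcases List.mem_cons.mp hy with h | h
            · exact h ▸ hxN
            · exact hPN y h)
      have := hsub.length_le
      simp at this
      omega
  | succ fuel ih =>
    intro q P od cnt hPnd hqnd hPN hclosed hready hod hcnt hkeys hknd hfuel
    cases q with
    | nil =>
      have hfin := kahn_final E N P cnt hmemN hsplit hPN
        (fun y hy => by have := (hready y).mpr hy; cases this) hcnt hkeys
      exact ⟨hfin.1, hfin.2, hknd⟩
    | cons x q' =>
      obtain ⟨hxN, hxP, hxchl⟩ := (hready x).mp (List.mem_cons_self)
      have hqnd' : q'.Nodup := (List.nodup_cons.mp hqnd).2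
      have hxq' : x ∉ q' := (List.nodup_cons.mp hqnd).1
      by_cases hpar : rg.contains x = true
      · -- x has a parent node
        obtain ⟨e, heE, hex⟩ := List.mem_map.mp ((hrgc x).mp hpar)
        have hedge : (e.1, x) ∈ E := by
          rw [← hex]
          simpa using heE
        have hp : rg.getD x "" = e.1 := hrgg e.1 x hedge
        have hxu : x ≠ e.1 := wf_ne E [] hwf (e.1, x) hedge
        have huN : e.1 ∈ N := (hmemN _ hedge).1
        have hxchlu : x ∈ chl E e.1 := (chl_mem E e.1 x).mpr hedge
        have htnd : (E.map (fun f => f.2)).Nodup := wf_targets_nodup E [] hwf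
        have hchlnd : (chl E e.1).Nodup := (chl_sublist_targets E e.1).nodup htnd
        have huniq : ∀ y, x ∈ chl E y → y = e.1 := by
          intro y hc
          have h1 : (y, x) ∈ E := (chl_mem E y x).mp hc
          have h2 := List.inj_on_of_nodup_map htnd h1 hedge rfl
          exact congrArg Prod.fst h2
        have hnotchl : ∀ y, y ≠ e.1 → x ∉ chl E y := fun y hy hc => hy (huniq y hc)
        have huP : e.1 ∉ P := fun hc => hxP (hclosed e.1 hc x hxchlu)
        have huq' : e.1 ∉ q' := by
          intro hc
          obtain ⟨_, _, hchl⟩ := (hready e.1).mp (List.mem_cons_of_mem _ hc)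
          exact hxP (hchl x hxchlu)
        have hcx : cnt.getD x 0 = (goDesc E).getD x 0 := by
          rw [hcnt x]
          unfold sInv
          rw [List.filter_eq_self.mpr (fun c hc => by simpa using hxchl c hc)]
          rw [← goDesc_sum E [] hwf x]
        have hstep : referKahn rg (fuel + 1) (x :: q') od cnt
            = (if (od.insert e.1 (od.getD e.1 0 - 1)).getD e.1 0 == 0
               then referKahn rg fuel (q' ++ [e.1]) (od.insert e.1 (od.getD e.1 0 - 1))
                      (cnt.insert e.1 (cnt.getD e.1 0 + 1 + cnt.getD x 0))
               else referKahn rg fuel q' (od.insert e.1 (od.getD e.1 0 - 1))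
                      (cnt.insert e.1 (cnt.getD e.1 0 + 1 + cnt.getD x 0))) := by
          simp only [referKahn]
          rw [if_pos hpar, hp]
        have hodu : (od.insert e.1 (od.getD e.1 0 - 1)).getD e.1 0
            = (((chl E e.1).filter (fun c => !decide (c ∈ x :: P))).length : Int) := by
          rw [PySem.Dict.getD_insert, if_pos rfl, hod e.1 huN]
          have := filter_not_cons_len (chl E e.1) P x hxchlu hchlnd hxP
          omega
        have hody : ∀ y ∈ N, (od.insert e.1 (od.getD e.1 0 - 1)).getD y 0
            = (((chl E y).filter (fun c => !decide (c ∈ x :: P))).length : Int) := by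
          intro y hyN
          by_cases hyu : y = e.1
          · subst hyu; exact hodu
          · rw [PySem.Dict.getD_insert, if_neg hyu, hod y hyN,
              filter_not_cons_not_mem _ _ _ (hnotchl y hyu)]
        have hcnty : ∀ y, (cnt.insert e.1 (cnt.getD e.1 0 + 1 + cnt.getD x 0)).getD y 0
            = sInv E (x :: P) y := by
          intro y
          by_cases hyu : y = e.1
          · subst hyu
            rw [PySem.Dict.getD_insert, if_pos rfl, hcnt e.1, hcx]
            unfold sInv
            rw [filter_cons_sum (fun c => 1 + (goDesc E).getD c 0) (chl E e.1) P x
              hxchlu hchlnd hxP]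
            ring
          · rw [PySem.Dict.getD_insert, if_neg hyu, hcnt y]
            unfold sInv
            rw [filter_cons_not_mem _ _ _ (hnotchl y hyu)]
        have hkeys' : ∀ k, k ∈ (cnt.insert e.1 (cnt.getD e.1 0 + 1 + cnt.getD x 0)).keys
            ↔ ∃ w ∈ x :: P, (k, w) ∈ E := by
          intro k
          rw [PySem.Dict.mem_keys_insert]
          constructor
          · rintro (h | h)
            · exact ⟨x, List.mem_cons_self, h ▸ hedge⟩
            · obtain ⟨w, hw, hwE⟩ := (hkeys k).mp h
              exact ⟨w, List.mem_cons_of_mem _ hw, hwE⟩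
          · rintro ⟨w, hw, hwE⟩
            rcases List.mem_cons.mp hw with h | h
            · exact Or.inl (huniq k ((chl_mem E k x).mpr (h ▸ hwE)))
            · exact Or.inr ((hkeys k).mpr ⟨w, h, hwE⟩)
        have hknd' : (cnt.insert e.1 (cnt.getD e.1 0 + 1 + cnt.getD x 0)).keys.Nodup :=
          PySem.Dict.nodup_keys_insert _ _ _ hknd
        have hPnd' : (x :: P).Nodup := List.nodup_cons.mpr ⟨hxP, hPnd⟩
        have hPN' : ∀ y ∈ x :: P, y ∈ N := by
          intro y hy
          rcases List.mem_cons.mp hy with h | h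
          · exact h ▸ hxN
          · exact hPN y h
        have hclosed' : ∀ y ∈ x :: P, ∀ c ∈ chl E y, c ∈ x :: P := by
          intro y hy c hc
          rcases List.mem_cons.mp hy with h | h
          · subst h
            exact List.mem_cons_of_mem _ (hxchl c hc)
          · exact List.mem_cons_of_mem _ (hclosed y h c hc)
        have hfuel' : N.length ≤ (x :: P).length + fuel := by
          simp only [List.length_cons]
          omega
        rw [hstep]
        by_cases hz : ((od.insert e.1 (od.getD e.1 0 - 1)).getD e.1 0 == 0) = true
        · rw [if_pos hz]
          have hchlu_sub : ∀ c ∈ chl E e.1, c ∈ x :: P := by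
            have hlen : ((chl E e.1).filter (fun c => !decide (c ∈ x :: P))).length = 0 := by
              rw [beq_iff_eq] at hz
              rw [hodu] at hz
              omega
            intro c hc
            by_contra hcc
            have hmem : c ∈ (chl E e.1).filter (fun c => !decide (c ∈ x :: P)) :=
              List.mem_filter.mpr ⟨hc, by simpa using hcc⟩
            rw [List.length_eq_zero_iff.mp hlen] at hmem
            cases hmem
          apply ih (q' ++ [e.1]) (x :: P) _ _ hPnd'
            (List.Nodup.append hqnd' (List.nodup_singleton e.1)
              (fun a ha hb => absurd ((List.mem_singleton.mp hb) ▸ ha) huq'))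
            hPN' hclosed' ?_ hody hcnty hkeys' hknd' hfuel'
          intro y
          constructor
          · intro hy
            rcases List.mem_append.mp hy with h | h
            · obtain ⟨hyN, hyP, hychl⟩ := (hready y).mp (List.mem_cons_of_mem _ h)
              have hyx : y ≠ x := fun he => hxq' (he ▸ h)
              refine ⟨hyN, fun hc => ?_, fun c hc => List.mem_cons_of_mem _ (hychl c hc)⟩
              rcases List.mem_cons.mp hc with hh | hh
              · exact hyx hh
              · exact hyP hh
            · have hyu : y = e.1 := List.mem_singleton.mp h
              subst hyu
              refine ⟨huN, fun hc => ?_, hchlu_sub⟩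
              rcases List.mem_cons.mp hc with hh | hh
              · exact hxu hh.symm
              · exact huP hh
          · rintro ⟨hyN, hyxP, hychl⟩
            by_cases hyu : y = e.1
            · exact List.mem_append.mpr (Or.inr (by simp [hyu]))
            · have hyx : y ≠ x := fun he => hyxP (he ▸ List.mem_cons_self)
              have hyP : y ∉ P := fun hc => hyxP (List.mem_cons_of_mem _ hc)
              have hchlP : ∀ c ∈ chl E y, c ∈ P := by
                intro c hc
                rcases List.mem_cons.mp (hychl c hc) with hh | hh
                · exact absurd (hh ▸ hc) (hnotchl y hyu)
                · exact hh
              have := (hready y).mpr ⟨hyN, hyP, hchlP⟩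
              rcases List.mem_cons.mp this with hh | hh
              · exact absurd hh hyx
              · exact List.mem_append.mpr (Or.inl hh)
        · rw [if_neg hz]
          have hchlu_not : ¬ ∀ c ∈ chl E e.1, c ∈ x :: P := by
            intro hcc
            apply hz
            rw [beq_iff_eq, hodu]
            rw [List.filter_eq_nil_iff.mpr (fun c hc => by simp [hcc c hc])]
            simp
          apply ih q' (x :: P) _ _ hPnd' hqnd' hPN' hclosed' ?_ hody hcnty hkeys' hknd' hfuel'
          intro y
          constructor
          · intro hy
            obtain ⟨hyN, hyP, hychl⟩ := (hready y).mp (List.mem_cons_of_mem _ hy)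
            have hyx : y ≠ x := fun he => hxq' (he ▸ hy)
            refine ⟨hyN, fun hc => ?_, fun c hc => List.mem_cons_of_mem _ (hychl c hc)⟩
            rcases List.mem_cons.mp hc with hh | hh
            · exact hyx hh
            · exact hyP hh
          · rintro ⟨hyN, hyxP, hychl⟩
            by_cases hyu : y = e.1
            · exact absurd (fun c hc => hychl c hc) (hyu ▸ hchlu_not)
            · have hyx : y ≠ x := fun he => hyxP (he ▸ List.mem_cons_self)
              have hyP : y ∉ P := fun hc => hyxP (List.mem_cons_of_mem _ hc)
              have hchlP : ∀ c ∈ chl E y, c ∈ P := by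
                intro c hc
                rcases List.mem_cons.mp (hychl c hc) with hh | hh
                · exact absurd (hh ▸ hc) (hnotchl y hyu)
                · exact hh
              have := (hready y).mpr ⟨hyN, hyP, hchlP⟩
              rcases List.mem_cons.mp this with hh | hh
              · exact absurd hh hyx
              · exact hh

      · -- x is a root
        have hnopar : ∀ y, x ∉ chl E y := by
          intro y hc
          exact hpar ((hrgc x).mpr (List.mem_map.mpr ⟨(y, x), (chl_mem E y x).mp hc, rfl⟩))
        have hstep : referKahn rg (fuel + 1) (x :: q') od cnt = referKahn rg fuel q' od cnt := by
          simp only [referKahn]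
          rw [if_neg hpar]
        rw [hstep]
        apply ih q' (x :: P) od cnt
        · exact List.nodup_cons.mpr ⟨hxP, hPnd⟩
        · exact hqnd'
        · intro y hy
          rcases List.mem_cons.mp hy with h | h
          · exact h ▸ hxN
          · exact hPN y h
        · intro y hy c hc
          rcases List.mem_cons.mp hy with h | h
          · subst h
            exact List.mem_cons_of_mem _ (hxchl c hc)
          · exact List.mem_cons_of_mem _ (hclosed y h c hc)
        · intro y
          constructor
          · intro hy
            obtain ⟨hyN, hyP, hychl⟩ := (hready y).mp (List.mem_cons_of_mem _ hy)
            have hyx : y ≠ x := fun he => hxq' (he ▸ hy)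
            refine ⟨hyN, fun hc => ?_, fun c hc => List.mem_cons_of_mem _ (hychl c hc)⟩
            rcases List.mem_cons.mp hc with h | h
            · exact hyx h
            · exact hyP h
          · rintro ⟨hyN, hyxP, hychl⟩
            have hyx : y ≠ x := fun he => hyxP (he ▸ List.mem_cons_self)
            have hyP : y ∉ P := fun hc => hyxP (List.mem_cons_of_mem _ hc)
            have hchlP : ∀ c ∈ chl E y, c ∈ P := by
              intro c hc
              rcases List.mem_cons.mp (hychl c hc) with h | h
              · exact absurd (h ▸ hc) (hnopar y)
              · exact h
            have := (hready y).mpr ⟨hyN, hyP, hchlP⟩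
            rcases List.mem_cons.mp this with h | h
            · exact absurd h hyx
            · exact h
        · intro y hyN
          rw [hod y hyN, filter_not_cons_not_mem _ _ _ (hnopar y)]
        · intro y
          rw [hcnt y]
          unfold sInv
          rw [filter_cons_not_mem _ _ _ (hnopar y)]
        · intro k
          rw [hkeys k]
          constructor
          · rintro ⟨w, hw, hwE⟩
            exact ⟨w, List.mem_cons_of_mem _ hw, hwE⟩
          · rintro ⟨w, hw, hwE⟩
            rcases List.mem_cons.mp hw with h | h
            · exact absurd (h ▸ hwE) (fun hc => hnopar k ((chl_mem E k x).mpr hc))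
            · exact ⟨w, h, hwE⟩
        · exact hknd
        · simp only [List.length_cons]
          omega

-- ---------- B's reverse pass is goDesc ----------

theorem goDesc_eq_revfold : ∀ (E : List (String × String)),
    E.reverse.foldl
      (fun (d : PySem.Dict String Int) uv => d.insert uv.1 (d.getD uv.1 0 + 1 + d.getD uv.2 0))
      PySem.Dict.empty = goDesc E := by
  intro E
  rw [List.foldl_reverse]
  induction E with
  | nil => rfl
  | cons e t ih => simp [goDesc, ih]

-- ---------- the deterministic sort: sorted2 over a permutation ----------

theorem sorted2_key_eq (zs : List (String × Int)) :
    PySem.List.sorted2 zs (fun t => -t.2) (fun t => t.1)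
      = PySem.List.sorted zs (fun t => toLex (-t.2, t.1)) := by
  rw [PySem.List.sorted_eq_foldl_insertBy]
  show List.foldl (fun acc x => PySem.List.insertBy _ x acc) [] zs = _
  have hfun : (fun (a b : String × Int) =>
      decide (-a.2 < -b.2) || (!decide (-b.2 < -a.2) && decide (a.1 < b.1)))
      = (fun (a b : String × Int) =>
      decide (toLex (-a.2, a.1) < toLex (-b.2, b.1))) := by
    funext a b
    rw [Bool.eq_iff_iff]
    simp only [Bool.or_eq_true, Bool.and_eq_true, Bool.not_eq_true', decide_eq_true_eq,
      decide_eq_false_iff_not, Prod.Lex.toLex_lt_toLex]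
    constructor
    · rintro (h | ⟨h1, h2⟩)
      · exact Or.inl h
      · rcases lt_trichotomy (-a.2) (-b.2) with hh | hh | hh
        · exact Or.inl hh
        · exact Or.inr ⟨hh, h2⟩
        · exact absurd hh h1
    · rintro (h | ⟨h1, h2⟩)
      · exact Or.inl h
      · exact Or.inr ⟨by omega, h2⟩
  rw [hfun]
  rfl

theorem sorted2_perm_eq (xs ys : List (String × Int)) (hperm : xs.Perm ys) :
    PySem.List.sorted2 xs (fun t => -t.2) (fun t => t.1)
      = PySem.List.sorted2 ys (fun t => -t.2) (fun t => t.1) := by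
  rw [sorted2_key_eq, sorted2_key_eq]
  apply PySem.List.sorted_eq_sorted_of_perm xs ys _ ?_ hperm
  intro a b h
  simp only [toLex_inj, Prod.mk.injEq] at h
  exact Prod.ext h.2 (by omega)

-- ---------- assembling the two pipelines ----------

def pipeA (st : PySem.Dict String (List String) × PySem.Dict String String × PySem.Set String) :
    List (String × Int) :=
  PySem.List.slice
    (PySem.List.sorted2
      ((referKahn st.2.1 st.2.2.length
          (st.2.2.foldl
            (fun q x =>
              if (st.2.2.foldl (fun d x => d.insert x (((st.1.getD x []).length : Int)))
                  PySem.Dict.empty).getD x 0 == 0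
              then q ++ [x] else q) [])
          (st.2.2.foldl (fun d x => d.insert x (((st.1.getD x []).length : Int)))
            PySem.Dict.empty)
          PySem.Dict.empty).items.filter (fun t => decide (0 < t.2)))
      (fun t => -t.2) (fun t => t.1)) none (some 3)

def pipeB (st : PySem.Set String × List (String × String)) : List (String × Int) :=
  PySem.List.slice
    (PySem.List.sorted2
      (st.2.reverse.foldl
        (fun (d : PySem.Dict String Int) uv => d.insert uv.1 (d.getD uv.1 0 + 1 + d.getD uv.2 0))
        PySem.Dict.empty).items
      (fun t => -t.2) (fun t => t.1)) none (some 3)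

theorem pipes_eq (E : List (String × String)) (N : List String)
    (hwf : WF E []) (hNd : N.Nodup)
    (hmemN : ∀ e ∈ E, e.1 ∈ N ∧ e.2 ∈ N)
    (hsplit : ∀ e ∈ E, ∃ p r, N = p ++ r ∧ e.1 ∈ p ∧ e.2 ∉ p) :
    pipeA (E.foldl (fun d e => d.modify e.1 [] (fun l => l ++ [e.2])) PySem.Dict.empty,
           E.foldl (fun d e => d.insert e.2 e.1) PySem.Dict.empty, N)
    = pipeB (N, E) := by
  unfold pipeA pipeB
  dsimp only
  set g := E.foldl (fun d e => d.modify e.1 [] (fun l => l ++ [e.2])) PySem.Dict.empty with hgdef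
  set rg := E.foldl (fun d e => d.insert e.2 e.1) PySem.Dict.empty with hrgdef
  set od0 := N.foldl (fun d x => d.insert x (((g.getD x []).length : Int))) PySem.Dict.empty
    with hoddef
  set q0 := N.foldl (fun q x => if od0.getD x 0 == 0 then q ++ [x] else q) [] with hqdef
  have htnd : (E.map (fun f => f.2)).Nodup := wf_targets_nodup E [] hwf
  -- rg facts
  have hrg_items : rg.items = E.map (fun e => (e.2, e.1)) := by
    rw [hrgdef]
    have := PySem.Dict.items_foldl_insert_fresh E (fun e => e.2) (fun e => e.1)
      PySem.Dict.empty (fun a _ => PySem.Dict.contains_empty _) htnd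
    simpa using this
  have hrg_keys : rg.keys = E.map (fun e => e.2) := by
    simp only [PySem.Dict.keys, hrg_items, List.map_map]
    rfl
  have hrgknd : rg.keys.Nodup := by rw [hrg_keys]; exact htnd
  have hrgc : ∀ x, rg.contains x = true ↔ x ∈ E.map (fun e => e.2) := by
    intro x
    rw [PySem.Dict.contains_iff_mem_keys, hrg_keys]
  have hrgg : ∀ u x, (u, x) ∈ E → rg.getD x "" = u := by
    intro u x he
    have hm : (x, u) ∈ rg.items := by
      rw [hrg_items]
      exact List.mem_map.mpr ⟨(u, x), he, rfl⟩
    exact PySem.Dict.getD_of_mem_items _ hm hrgknd _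
  -- g facts
  have hg : ∀ y, g.getD y [] = chl E y := by
    intro y
    rw [hgdef]
    have := PySem.Dict.getD_foldl_modify_append E PySem.Dict.empty y
    rw [this, PySem.Dict.getD_empty]
    simp [chl]
  -- out-degree facts
  have hod_items : od0.items = N.map (fun x => (x, ((g.getD x []).length : Int))) := by
    rw [hoddef]
    have := PySem.Dict.items_foldl_insert_fresh N (fun x => x)
      (fun x => ((g.getD x []).length : Int)) PySem.Dict.empty
      (fun a _ => PySem.Dict.contains_empty _) (by simpa using hNd)
    simpa using this
  have hod_keys : od0.keys = N := by
    simp only [PySem.Dict.keys, hod_items, List.map_map]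
    exact List.map_id _
  have hodknd : od0.keys.Nodup := by rw [hod_keys]; exact hNd
  have hod0 : ∀ y ∈ N, od0.getD y 0 = ((chl E y).length : Int) := by
    intro y hy
    have hm : (y, ((g.getD y []).length : Int)) ∈ od0.items := by
      rw [hod_items]
      exact List.mem_map.mpr ⟨y, hy, rfl⟩
    rw [PySem.Dict.getD_of_mem_items _ hm hodknd, hg]
  -- queue facts
  have hq0 : q0 = N.filter (fun x => od0.getD x 0 == 0) := by
    rw [hqdef]
    have := PySem.List.foldl_append_if_eq_filter (fun x => od0.getD x 0 == 0) N []
    simpa using this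
  have hq0nd : q0.Nodup := by rw [hq0]; exact hNd.filter _
  have hq0mem : ∀ y, y ∈ q0 ↔ (y ∈ N ∧ y ∉ ([] : List String) ∧
      ∀ c ∈ chl E y, c ∈ ([] : List String)) := by
    intro y
    rw [hq0]
    constructor
    · intro h
      obtain ⟨hyN, hyz⟩ := List.mem_filter.mp h
      rw [hod0 y hyN] at hyz
      have hlen : (chl E y).length = 0 := by
        rw [beq_iff_eq] at hyz
        omega
      refine ⟨hyN, by simp, ?_⟩
      intro c hc
      rw [List.length_eq_zero_iff.mp hlen] at hc
      cases hc
    · rintro ⟨hyN, _, hchl⟩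
      have hnil : chl E y = [] := by
        cases hcs : chl E y with
        | nil => rfl
        | cons a t => exact absurd (hchl a (by rw [hcs]; exact List.mem_cons_self)) (by simp)
      refine List.mem_filter.mpr ⟨hyN, ?_⟩
      rw [hod0 y hyN, hnil]
      simp
  -- run the sweep
  obtain ⟨hv, hk, hknd⟩ := kahn_main E N rg hwf hmemN hsplit hrgc hrgg N.length q0 []
    od0 PySem.Dict.empty List.nodup_nil hq0nd
    (fun y hy => absurd hy (List.not_mem_nil))
    (fun y hy => absurd hy (List.not_mem_nil))
    hq0mem
    (by
      intro y hy
      rw [hod0 y hy, List.filter_eq_self.mpr (fun c _ => by simp)])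
    (by
      intro y
      unfold sInv
      rw [List.filter_eq_nil_iff.mpr (fun c _ => by simp), PySem.Dict.getD_empty]
      simp)
    (by
      intro k
      rw [PySem.Dict.keys_empty]
      simp)
    (by rw [PySem.Dict.keys_empty]; exact List.nodup_nil)
    (by omega)
  set cntA := referKahn rg N.length q0 od0 PySem.Dict.empty with hcadef
  -- values and keys of the sweep result
  have hkeysA_mem : ∀ k, k ∈ cntA.keys ↔ k ∈ (goDesc E).keys := by
    intro k
    rw [hk k, goDesc_keys_mem]
    constructor
    · rintro ⟨w, _, hwE⟩
      exact List.mem_map.mpr ⟨(k, w), hwE, rfl⟩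
    · intro h
      rcases List.mem_map.mp h with ⟨e, he, he1⟩
      refine ⟨e.2, (hmemN e he).2, ?_⟩
      have he2 : (k, e.2) = e := by
        cases e
        simp only at he1
        simp [he1]
      rwa [he2]
  have hvals : ∀ y, cntA.getD y 0 = (goDesc E).getD y 0 := by
    intro y
    rw [hv y]
    unfold sInv
    rw [List.filter_eq_self.mpr
      (fun c hc => by simp [(hmemN _ ((chl_mem E y c).mp hc)).2])]
    exact (goDesc_sum E [] hwf y).symm
  have hpos : ∀ t ∈ cntA.items, decide (0 < t.2) = true := by
    intro t ht
    rw [PySem.Dict.items_eq_map_keys cntA hknd 0] at ht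
    rcases List.mem_map.mp ht with ⟨k, hkk, hkt⟩
    subst hkt
    have h1 : 1 ≤ (goDesc E).getD k 0 := goDesc_pos E k ((hkeysA_mem k).mp hkk)
    have h2 := hvals k
    simp only [decide_eq_true_eq]
    omega
  have hfilter : cntA.items.filter (fun t => decide (0 < t.2)) = cntA.items :=
    List.filter_eq_self.mpr hpos
  have hperm : cntA.items.Perm (goDesc E).items := by
    rw [PySem.Dict.items_eq_map_keys cntA hknd 0,
      PySem.Dict.items_eq_map_keys (goDesc E) (goDesc_keys_nodup E) 0]
    have hkperm : cntA.keys.Perm (goDesc E).keys :=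
      (List.perm_ext_iff_of_nodup hknd (goDesc_keys_nodup E)).mpr hkeysA_mem
    have hmapeq : cntA.keys.map (fun k => (k, cntA.getD k 0))
        = cntA.keys.map (fun k => (k, (goDesc E).getD k 0)) :=
      List.map_congr_left (fun k _ => by rw [hvals k])
    rw [hmapeq]
    exact hkperm.map _
  rw [hfilter, goDesc_eq_revfold E, sorted2_perm_eq _ _ hperm]

theorem referSystem_eq_alt (referrers referrals : List String) :
    referSystem referrers referrals = referSystem_alt referrers referrals := by
  have h1 : referSystem referrers referrals
      = pipeA ((referrers.zip referrals).foldl astep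
          (PySem.Dict.empty, PySem.Dict.empty, PySem.Set.empty)) := rfl
  have h2 : referSystem_alt referrers referrals
      = pipeB ((referrers.zip referrals).foldl bstep (PySem.Set.empty, [])) := rfl
  rw [h1, h2, afold_eq, bfold_eq]
  simp only [List.nil_append]
  exact pipes_eq _ _ (wf_keptP _ _) (keptP_nodup _ _ List.nodup_nil)
    (fun e he => by
      obtain ⟨p, r, hN, hm1, hm2, hm3⟩ := keptP_edge_split _ _ e he
      exact ⟨by rw [hN]; exact List.mem_append_left _ hm1, hm3⟩)
    (fun e he => by
      obtain ⟨p, r, hN, hm1, hm2, hm3⟩ := keptP_edge_split _ _ e he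
      exact ⟨p, r, hN, hm1, hm2⟩)

-- ===== VERDICT (by name: the statement is the Claim_ definition above) =====
theorem referSystem_spec : Claim_equal_referSystem := by
  intro referrers referrals _
  unfold Spec_referSystem
  exact referSystem_eq_alt referrers referrals
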